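-- pv_equiv track=rewrite | github.com/by-gramm/TIL | algorithm/problem solving reviews/220908-220914/2020KAKAO_외벽 점검_try2.py | solution
-- ===== SOURCE A (Python) =====
-- from itertools import permutations
--
-- def solution(n, weak, dist):
--     W, D = len(weak), len(dist)
--
--     for w in range(W - 1):
--         weak.append(weak[w] + n)
--
--     dist.sort(reverse=True)
--
--     for count in range(1, D + 1):
--         for start_idx in range(W):
--             cnt_location = weak[start_idx]
--             cnt_idx = start_idx
--             end_idx = start_idx + W - 1
--
--             for distance_set in permutations(dist[:count], count):
--                 for distance in distance_set:
--
--                     while cnt_idx <= end_idx and weak[cnt_idx] <= cnt_location + distance: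
--                         cnt_idx += 1
--
--                     if cnt_idx > end_idx:
--                         return count
--
--                     cnt_location = weak[cnt_idx]
--
--                 cnt_idx = start_idx
--                 cnt_location = weak[cnt_idx]
--
--     return -1
-- ===== SOURCE B (Python) =====
-- def solution(n, weak, dist):
--     W = len(weak)
--     ext = weak + [w + n for w in weak[:-1]]
--     ds = sorted(dist, reverse=True)
--
--     def next_uncovered(i, fin, limit):
--         # first still-uncovered index in ext[i..fin], or None if all covered
--         for j in range(i, fin + 1):
--             if ext[j] > limit:
--                 return j
--         return None
--
--     def cover(rem, i, loc, fin):
--         # depth-first over orderings of rem, sharing common prefixes,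
--         # succeeding as soon as the whole stretch is covered
--         for k in range(len(rem)):
--             j = next_uncovered(i, fin, loc + rem[k])
--             if j is None:
--                 return True
--             if cover(rem[:k] + rem[k + 1:], j, ext[j], fin):
--                 return True
--         return False
--
--     def min_count(count):
--         if count > len(ds):
--             return -1
--         if any(cover(ds[:count], s, ext[s], s + W - 1) for s in range(W)):
--             return count
--         return min_count(count + 1)
--
--     return min_count(1)
-- ===== Notes on version B (the rewrite author's own statement) =====
-- stated objective: alternative
-- what changed: B replaces A's enumeration of every itertools.permutations tuple (each re-simulated from scratch) by a recursive depth-first backtracking search that picks one remaining distance at a time, shares common prefixes, finds the next uncovered point with an Option-returning scan, and iterates the friend count by recursion instead of A's nested count/permutation loops.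
import Mathlib
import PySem

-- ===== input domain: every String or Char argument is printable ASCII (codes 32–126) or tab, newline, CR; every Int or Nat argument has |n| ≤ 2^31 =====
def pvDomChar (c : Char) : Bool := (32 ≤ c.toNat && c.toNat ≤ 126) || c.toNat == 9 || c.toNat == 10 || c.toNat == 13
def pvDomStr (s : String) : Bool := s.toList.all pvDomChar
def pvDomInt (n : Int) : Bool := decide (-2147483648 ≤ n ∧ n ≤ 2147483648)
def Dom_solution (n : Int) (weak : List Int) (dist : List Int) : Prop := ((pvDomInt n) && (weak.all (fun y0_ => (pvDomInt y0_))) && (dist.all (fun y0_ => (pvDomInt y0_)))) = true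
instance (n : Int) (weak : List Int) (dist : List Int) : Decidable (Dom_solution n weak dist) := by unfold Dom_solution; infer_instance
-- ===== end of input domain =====

-- B replaces A's enumeration of every itertools.permutations tuple (each re-simulated from
-- scratch) by a depth-first backtracking search that picks one remaining distance at a time,
-- shares common prefixes and succeeds as soon as the stretch is covered (objective:
-- alternative; equivalence is about the RETURN value — A also mutates its `weak`/`dist`
-- arguments in place, B does not).

-- ===== PORT A =====
-- the doubled weak list: `weak.append(weak[w] + n) for w in range(W-1)`
def pvExt (n : Int) (weak : List Int) : List Int :=
  weak ++ (weak.take (weak.length - 1)).map (fun w => w + n)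

-- the `while cnt_idx <= end_idx and weak[cnt_idx] <= cnt_location + distance` loop
-- (index access via getD: the loop guard keeps the index in range in the Python)
def pvAdv (ext : List Int) (endIdx : Nat) (limit : Int) (i : Nat) : Nat :=
  if h : i ≤ endIdx ∧ ext.getD i 0 ≤ limit then pvAdv ext endIdx limit (i + 1) else i
termination_by endIdx + 1 - i
decreasing_by omega

-- A's `for distance in distance_set` simulation of one permutation
def pvSim (ext : List Int) (endIdx : Nat) : List Int → Nat → Int → Bool
  | [], _, _ => false
  | d :: rest, i, loc =>
    let j := pvAdv ext endIdx (loc + d) i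
    if endIdx < j then true else pvSim ext endIdx rest j (ext.getD j 0)

def solution (n : Int) (weak : List Int) (dist : List Int) : Int :=
  match (List.range' 1 dist.length).find? (fun count =>
      (List.range weak.length).any (fun start =>
        (((PySem.List.sorted dist (fun x => x) true).take count).permutations).any (fun p =>
          pvSim (pvExt n weak) (start + weak.length - 1) p start
            ((pvExt n weak).getD start 0)))) with
  | some c => (c : Int)
  | none => -1

-- ===== PORT B =====
-- B's doubled list: `weak + [w + n for w in weak[:-1]]`
def pvExtB (n : Int) (weak : List Int) : List Int :=
  weak ++ weak.dropLast.map (fun w => w + n)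

-- B's `next_uncovered(i, fin, limit)`: first index in ext[i..fin] past the limit, else None
def pvNextUncovered (ext : List Int) (i fin : Nat) (limit : Int) : Option Nat :=
  (List.range' i (fin + 1 - i)).find? (fun j => decide (limit < ext.getD j 0))

-- B's `cover(rem, i, loc, fin)`: pick any one remaining distance, jump to the next
-- uncovered point, recurse on the rest; the Nat argument is a fuel equal to rem.length
-- (structural-recursion device only)
def pvCoverDfs (ext : List Int) (fin : Nat) : Nat → List Int → Nat → Int → Bool
  | 0, _, _, _ => false
  | fuel + 1, rem, i, loc =>
    (List.range rem.length).any (fun k =>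
      match pvNextUncovered ext i fin (loc + rem.getD k 0) with
      | none => true
      | some j => pvCoverDfs ext fin fuel (rem.eraseIdx k) j (ext.getD j 0))

-- B's recursive `min_count`
def pvMinCount (W : Nat) (ext ds : List Int) (count : Nat) : Int :=
  if ds.length < count then -1
  else if (List.range W).any (fun s =>
      pvCoverDfs ext (s + W - 1) count (ds.take count) s (ext.getD s 0)) then (count : Int)
  else pvMinCount W ext ds (count + 1)
termination_by ds.length + 1 - count
decreasing_by omega

def solution_alt (n : Int) (weak : List Int) (dist : List Int) : Int :=
  pvMinCount weak.length (pvExtB n weak) (PySem.List.sorted dist (fun x => x) true) 1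

-- ===== PRECONDITION & SPEC =====
def Spec_solution (n : Int) (weak : List Int) (dist : List Int) (out : Int) : Prop := out = solution_alt n weak dist
instance (n : Int) (weak : List Int) (dist : List Int) (out : Int) : Decidable (Spec_solution n weak dist out) := by unfold Spec_solution; infer_instance

-- ===== CLAIM (what is proved, stated in full; the proofs are below) =====
def Claim_equal_solution : Prop := ∀ (n : Int) (weak : List Int) (dist : List Int), Dom_solution n weak dist → Spec_solution n weak dist (solution n weak dist)

-- ===== LEMMAS AND PROOFS =====

theorem ext_eq (n : Int) (weak : List Int) : pvExtB n weak = pvExt n weak := by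
  simp [pvExt, pvExtB, List.dropLast_eq_take]

-- next_uncovered is exactly A's while-loop index, packaged as an Option
theorem find_range'_eq_adv (ext : List Int) (fin : Nat) (limit : Int) :
    ∀ (k i : Nat), fin + 1 - i = k →
      (List.range' i k).find? (fun j => decide (limit < ext.getD j 0))
        = (if pvAdv ext fin limit i ≤ fin then some (pvAdv ext fin limit i) else none) := by
  intro k
  induction k with
  | zero =>
    intro i hk
    have hgt : ¬ i ≤ fin := by omega
    have hadv : pvAdv ext fin limit i = i := by
      rw [pvAdv, dif_neg (fun h => hgt h.1)]
    rw [List.range'_zero, List.find?_nil, hadv, if_neg hgt]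
  | succ m ihm =>
    intro i hk
    have hle : i ≤ fin := by omega
    rw [List.range'_succ]
    by_cases hc : ext.getD i 0 ≤ limit
    · have hp : decide (limit < ext.getD i 0) = false := by
        rw [decide_eq_false_iff_not]; omega
      have hadv : pvAdv ext fin limit i = pvAdv ext fin limit (i + 1) := by
        rw [pvAdv, dif_pos ⟨hle, hc⟩]
      rw [List.find?_cons]
      simp only [hp, hadv]
      exact ihm (i + 1) (by omega)
    · have hp : decide (limit < ext.getD i 0) = true := by
        rw [decide_eq_true_eq]; omega
      have hadv : pvAdv ext fin limit i = i := by
        rw [pvAdv, dif_neg (fun h => hc h.2)]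
      rw [List.find?_cons]
      simp only [hp, hadv, if_pos hle]

theorem nextUncovered_eq_adv (ext : List Int) (fin : Nat) (limit : Int) (i : Nat) :
    pvNextUncovered ext i fin limit
      = (if pvAdv ext fin limit i ≤ fin then some (pvAdv ext fin limit i) else none) :=
  find_range'_eq_adv ext fin limit (fin + 1 - i) i rfl

theorem perm_cons_eraseIdx {α : Type} (l : List α) (k : Nat) (h : k < l.length) :
    l.Perm (l[k] :: l.eraseIdx k) := by
  induction l generalizing k with
  | nil => simp at h
  | cons a t ih =>
    cases k with
    | zero => simp
    | succ k =>
      simp only [List.length_cons, Nat.succ_lt_succ_iff] at h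
      simpa [List.eraseIdx_cons_succ] using
        ((ih k h).cons a).trans (List.Perm.swap _ _ _)

-- B's DFS decides exactly "some permutation of rem succeeds in A's simulation"
theorem perm_any_eq_cover (ext : List Int) (e : Nat) :
    ∀ (m : Nat) (rem : List Int), rem.length = m → ∀ (i : Nat) (loc : Int),
      (rem.permutations.any (fun p => pvSim ext e p i loc))
        = pvCoverDfs ext e m rem i loc := by
  intro m
  induction m using Nat.strong_induction_on with
  | _ m ih =>
    intro rem hm i loc
    cases m with
    | zero =>
      have : rem = [] := List.length_eq_zero_iff.mp hm
      subst this
      simp [pvCoverDfs, pvSim]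
    | succ t =>
      rw [Bool.eq_iff_iff]
      simp only [List.any_eq_true, List.mem_permutations, pvCoverDfs, List.mem_range]
      constructor
      · rintro ⟨p, hp, hsim⟩
        match p with
        | [] => simp [pvSim] at hsim
        | d :: rest =>
          have hd : d ∈ rem := hp.mem_iff.mp (by simp)
          obtain ⟨k, hk, hdk⟩ := List.mem_iff_getElem.mp hd
          refine ⟨k, by omega, ?_⟩
          have hgetD : rem.getD k 0 = d := by
            rw [List.getD_eq_getElem?_getD, List.getElem?_eq_getElem hk, hdk]; rfl
          simp only [hgetD, nextUncovered_eq_adv]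
          simp only [pvSim] at hsim
          by_cases hcov : e < pvAdv ext e (loc + d) i
          · simp [show ¬ (pvAdv ext e (loc + d) i ≤ e) by omega]
          · simp only [if_neg hcov] at hsim
            simp only [if_pos (show pvAdv ext e (loc + d) i ≤ e by omega)]
            have hrest : rest.Perm (rem.eraseIdx k) := by
              have h1 : (d :: rest).Perm (d :: rem.eraseIdx k) :=
                hp.trans (by simpa [hdk] using perm_cons_eraseIdx rem k hk)
              exact h1.cons_inv
            have hlen : (rem.eraseIdx k).length = t := by
              rw [List.length_eraseIdx_of_lt hk]; omega
            rw [← ih t (by omega) (rem.eraseIdx k) hlen]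
            simp only [List.any_eq_true, List.mem_permutations]
            exact ⟨rest, hrest, hsim⟩
      · rintro ⟨k, hk, hcov⟩
        have hk' : k < rem.length := by omega
        set d := rem.getD k 0 with hd
        have hdk : rem[k] = d := by
          rw [hd, List.getD_eq_getElem?_getD, List.getElem?_eq_getElem hk']; rfl
        have hperm : (d :: rem.eraseIdx k).Perm rem := by
          rw [← hdk]; exact (perm_cons_eraseIdx rem k hk').symm
        rw [nextUncovered_eq_adv] at hcov
        by_cases hc : pvAdv ext e (loc + d) i ≤ e
        · simp only [if_pos hc] at hcov
          have hlen : (rem.eraseIdx k).length = t := by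
            rw [List.length_eraseIdx_of_lt hk']; omega
          rw [← ih t (by omega) (rem.eraseIdx k) hlen] at hcov
          simp only [List.any_eq_true, List.mem_permutations] at hcov
          obtain ⟨p', hp', hsim'⟩ := hcov
          refine ⟨d :: p', (hp'.cons d).trans hperm, ?_⟩
          simp only [pvSim, if_neg (show ¬ e < pvAdv ext e (loc + d) i by omega)]
          exact hsim'
        · exact ⟨d :: rem.eraseIdx k, hperm, by simp [pvSim, show e < pvAdv ext e (loc + d) i by omega]⟩

-- helper: find?/any respect pointwise-on-members equality of their predicates
theorem find?_congr_mem {a : Type} (p q : a -> Bool) (l : List a)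
    (h : forall x, x ∈ l -> p x = q x) : l.find? p = l.find? q := by
  induction l with
  | nil => rfl
  | cons b t ih =>
    rw [List.find?_cons, List.find?_cons, h b (List.mem_cons_self)]
    cases q b with
    | true => rfl
    | false => exact ih (fun x hx => h x (List.mem_cons_of_mem _ hx))

theorem any_congr_mem {a : Type} (p q : a -> Bool) (l : List a)
    (h : forall x, x ∈ l -> p x = q x) : l.any p = l.any q := by
  induction l with
  | nil => rfl
  | cons b t ih =>
    rw [List.any_cons, List.any_cons, h b (List.mem_cons_self),
      ih (fun x hx => h x (List.mem_cons_of_mem _ hx))]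

-- B's recursive min_count equals A's find?-over-counts scan
theorem minCount_eq_find (W : Nat) (ext ds : List Int) (count : Nat) :
    pvMinCount W ext ds count
      = (match (List.range' count (ds.length + 1 - count)).find? (fun c =>
            (List.range W).any (fun s =>
              pvCoverDfs ext (s + W - 1) c (ds.take c) s (ext.getD s 0))) with
         | some c => (c : Int)
         | none => -1) := by
  by_cases hgt : ds.length < count
  · rw [pvMinCount, if_pos hgt, show ds.length + 1 - count = 0 by omega,
      List.range'_zero, List.find?_nil]
  · rw [pvMinCount, if_neg hgt,
      show ds.length + 1 - count = (ds.length - count) + 1 by omega, List.range'_succ]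
    by_cases hhit : ((List.range W).any (fun s =>
        pvCoverDfs ext (s + W - 1) count (ds.take count) s (ext.getD s 0))) = true
    · rw [if_pos hhit, List.find?_cons]
      simp only [hhit]
    · simp only [Bool.not_eq_true] at hhit
      rw [if_neg (fun h => Bool.false_ne_true (hhit ▸ h)), List.find?_cons]
      simp only [hhit,
        minCount_eq_find W ext ds (count + 1),
        show ds.length + 1 - (count + 1) = ds.length - count by omega]
termination_by ds.length + 1 - count
decreasing_by omega

-- ===== VERDICT (by name: the statement is the Claim_ definition above) =====
theorem solution_spec : Claim_equal_solution := by
  intro n weak dist _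
  unfold Spec_solution solution solution_alt
  rw [minCount_eq_find, ext_eq, PySem.List.length_sorted,
    show dist.length + 1 - 1 = dist.length by omega]
  congr 1
  apply find?_congr_mem
  intro c hc
  have hcle : c ≤ dist.length := by
    have := List.mem_range'_1.mp hc
    omega
  apply any_congr_mem
  intro s _
  rw [perm_any_eq_cover (pvExt n weak) (s + weak.length - 1) c _
    (by rw [List.length_take, PySem.List.length_sorted]; omega)]
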